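-- pv_equiv track=rewrite | github.com/thepratholic/Competitive-Programming | LeetCode/Weekly Contest 486/Minimum Prefix Removal to Make Array Strictly Increasing.py | minimumPrefixLength
-- ===== SOURCE A (Python) =====
-- from typing import List
--
-- def minimumPrefixLength(nums: List[int]) -> int:
--     n = len(nums)
--
--     suf = [False] * n
--     suf[-1] = True
--
--     for i in range(n - 2, -1, -1):
--         if nums[i] < nums[i + 1]:
--             suf[i] = True
--
--         else:
--             break
--
--     for i in range(n - 1, -1, -1):
--         if not suf[i]:
--             return i + 1
--
--     return 0
-- ===== SOURCE B (Python) =====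
-- def minimumPrefixLength(nums):
--     ans = 0
--     for i in range(len(nums) - 1):
--         if nums[i] >= nums[i + 1]:
--             ans = i + 1
--     return ans
-- ===== Notes on version B (the rewrite author's own statement) =====
-- stated objective: simpler
-- what changed: Replaces A's boolean suffix array built by a backward loop plus a second backward locating scan with one forward pass that keeps only the position after the last descent.
import Mathlib
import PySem

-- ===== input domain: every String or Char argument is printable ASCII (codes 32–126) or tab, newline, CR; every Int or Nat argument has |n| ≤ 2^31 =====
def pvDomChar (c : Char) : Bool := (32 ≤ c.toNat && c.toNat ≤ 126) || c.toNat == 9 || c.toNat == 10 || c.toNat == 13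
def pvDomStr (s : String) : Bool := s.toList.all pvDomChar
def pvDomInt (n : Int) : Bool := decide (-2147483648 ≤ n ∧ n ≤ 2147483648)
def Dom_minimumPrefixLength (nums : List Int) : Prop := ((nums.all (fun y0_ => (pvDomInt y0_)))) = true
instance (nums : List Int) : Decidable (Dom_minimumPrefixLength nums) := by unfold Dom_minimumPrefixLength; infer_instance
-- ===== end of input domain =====

-- B replaces A's boolean suffix array + second backward scan by one forward pass
-- keeping only the position after the last descent (objective: simpler, O(1) extra space).
-- A raises IndexError on [] (suf[-1]); Pre_ excludes it; B happens to return 0 there.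

-- ===== PORT A =====
-- 'for i in range(n-2,-1,-1): if nums[i] < nums[i+1]: suf[i]=True else: break',
-- transliterated as recursion on the counter c (c = k+1 processes index k, then k-1, …);
-- loop indices are always in range, so nums[i] / nums[i+1] are List.getD _ 0 exactly.
def pvSufLoop (nums : List Int) : Nat → List Bool → List Bool
  | 0, suf => suf
  | k + 1, suf =>
    if nums.getD k 0 < nums.getD (k + 1) 0 then
      pvSufLoop nums k (suf.set k true)
    else
      suf

-- 'for i in range(n-1,-1,-1): if not suf[i]: return i+1' then 'return 0';
-- c = k+1 inspects index k (always in range).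
def pvFindLoop (suf : List Bool) : Nat → Int
  | 0 => 0
  | k + 1 => if !(suf.getD k false) then (k : Int) + 1 else pvFindLoop suf k

def minimumPrefixLength (nums : List Int) : Int :=
  let n := nums.length
  -- suf = [False] * n; suf[-1] = True  (Python raises IndexError when n = 0; Pre_ excludes it)
  let suf := (List.replicate n false).set (n - 1) true
  let suf := pvSufLoop nums (n - 1) suf
  pvFindLoop suf n

-- ===== PORT B =====
-- ans = 0; for i in range(len(nums)-1): if nums[i] >= nums[i+1]: ans = i+1; return ans
def minimumPrefixLength_alt (nums : List Int) : Int :=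
  (List.range (nums.length - 1)).foldl
    (fun ans i => if nums.getD (i + 1) 0 ≤ nums.getD i 0 then (i : Int) + 1 else ans) 0

-- ===== PRECONDITION & SPEC =====
-- Pre_ excludes only the empty list, on which Python A raises IndexError at 'suf[-1] = True'.
def Pre_minimumPrefixLength (nums : List Int) : Prop := nums ≠ []
instance (nums : List Int) : Decidable (Pre_minimumPrefixLength nums) := by
  unfold Pre_minimumPrefixLength; infer_instance
def pvWitness_minimumPrefixLength : List Int := ([3, 1, 2] : List Int)

def Spec_minimumPrefixLength (nums : List Int) (out : Int) : Prop := out = minimumPrefixLength_alt nums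
instance (nums : List Int) (out : Int) : Decidable (Spec_minimumPrefixLength nums out) := by unfold Spec_minimumPrefixLength; infer_instance

-- ===== CLAIM (what is proved, stated in full; the proofs are below) =====
def Claim_equal_minimumPrefixLength : Prop := ∀ (nums : List Int), Dom_minimumPrefixLength nums → Pre_minimumPrefixLength nums → Spec_minimumPrefixLength nums (minimumPrefixLength nums)


-- ===== LEMMAS AND PROOFS =====

-- index (strictly below c) of the last descent, if any
def pvLastDesc (nums : List Int) : Nat → Option Nat
  | 0 => none
  | k + 1 => if nums.getD (k + 1) 0 ≤ nums.getD k 0 then some k else pvLastDesc nums k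

-- boundary: first index of the strictly-increasing tail among indices < c
def pvBnd (nums : List Int) (c : Nat) : Nat :=
  match pvLastDesc nums c with
  | some j => j + 1
  | none => 0

theorem pvLastDesc_step (nums : List Int) (k : Nat) :
    pvLastDesc nums (k + 1)
      = if nums.getD (k + 1) 0 ≤ nums.getD k 0 then some k else pvLastDesc nums k := rfl

theorem pvLastDesc_lt (nums : List Int) (c j : Nat) (h : pvLastDesc nums c = some j) : j < c := by
  induction c with
  | zero => simp [pvLastDesc] at h
  | succ k ih =>
    rw [pvLastDesc_step] at h
    split at h
    · simp only [Option.some.injEq] at h; omega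
    · exact Nat.lt_succ_of_lt (ih h)

theorem pvBnd_le (nums : List Int) (c : Nat) : pvBnd nums c ≤ c := by
  unfold pvBnd
  cases h : pvLastDesc nums c with
  | none => exact Nat.zero_le _
  | some j => exact pvLastDesc_lt nums c j h

theorem B_eq_bnd (nums : List Int) : ∀ (c : Nat) (a : Int),
    (List.range c).foldl
      (fun ans i => if nums.getD (i + 1) 0 ≤ nums.getD i 0 then (i : Int) + 1 else ans) a
    = (match pvLastDesc nums c with
       | some j => (j : Int) + 1
       | none => a) := by
  intro c
  induction c with
  | zero => intro a; simp [pvLastDesc]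
  | succ k ih =>
    intro a
    rw [List.range_succ, List.foldl_append]
    simp only [List.foldl_cons, List.foldl_nil, pvLastDesc_step]
    split
    · rfl
    · exact ih a

theorem sufLoop_char (nums : List Int) : ∀ (c : Nat) (suf : List Bool), c ≤ suf.length →
    ∀ i, (pvSufLoop nums c suf).getD i false
      = if pvBnd nums c ≤ i ∧ i < c then true else suf.getD i false := by
  intro c
  induction c with
  | zero => intro suf _ i; simp [pvSufLoop]
  | succ k ih =>
    intro suf hlen i
    simp only [pvSufLoop]
    by_cases hasc : nums.getD k 0 < nums.getD (k + 1) 0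
    · -- ascent at k: set suf[k] := true and recurse
      rw [if_pos hasc]
      have hb : pvBnd nums (k + 1) = pvBnd nums k := by
        unfold pvBnd; rw [pvLastDesc_step, if_neg (not_le.mpr hasc)]
      rw [ih (suf.set k true) (by rw [List.length_set]; omega) i, hb]
      have hble := pvBnd_le nums k
      by_cases hik : i < k
      · by_cases hbi : pvBnd nums k ≤ i
        · rw [if_pos ⟨hbi, hik⟩, if_pos ⟨hbi, by omega⟩]
        · rw [if_neg (fun h => hbi h.1), if_neg (fun h => hbi h.1)]
          simp [List.getD, List.getElem?_set_ne (show k ≠ i by omega)]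
      · by_cases hik1 : i = k
        · subst hik1
          rw [if_neg (by omega), if_pos ⟨by omega, by omega⟩]
          simp [List.getD, List.getElem?_set_self (show i < suf.length by omega)]
        · rw [if_neg (by omega), if_neg (by omega)]
          simp [List.getD, List.getElem?_set_ne (show k ≠ i by omega)]
    · -- descent at k: break, suf unchanged
      rw [if_neg hasc]
      have hb : pvBnd nums (k + 1) = k + 1 := by
        unfold pvBnd; rw [pvLastDesc_step, if_pos (not_lt.mp hasc)]
      rw [hb, if_neg (by omega)]

theorem findLoop_eq (suf : List Bool) : ∀ (c b : Nat), b ≤ c →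
    (∀ i, i < c → suf.getD i false = decide (b ≤ i)) →
    pvFindLoop suf c = (b : Int) := by
  intro c
  induction c with
  | zero =>
    intro b hb _
    have hb0 : b = 0 := Nat.le_zero.mp hb
    subst hb0; simp [pvFindLoop]
  | succ k ih =>
    intro b hb hval
    simp only [pvFindLoop]
    rw [hval k (Nat.lt_succ_self k)]
    by_cases hbk : b ≤ k
    · rw [if_neg (by simp [hbk])]
      exact ih b hbk fun i hi => hval i (Nat.lt_succ_of_lt hi)
    · rw [if_pos (by simp [hbk])]
      omega

theorem initSuf_getD (n : Nat) (hn : 1 ≤ n) (i : Nat) :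
    ((List.replicate n false).set (n - 1) true).getD i false = decide (i = n - 1) := by
  by_cases h : i = n - 1
  · subst h
    simp [List.getD,
      List.getElem?_set_self (show n - 1 < (List.replicate n false).length by simp; omega)]
  · rw [show ((List.replicate n false).set (n - 1) true).getD i false
        = (((List.replicate n false).set (n - 1) true)[i]?).getD false from rfl,
      List.getElem?_set_ne (show n - 1 ≠ i by omega)]
    by_cases hi : i < n
    · simp [List.getElem?_replicate_of_lt hi, h]
    · simp [List.getElem?_eq_none (show (List.replicate n false).length ≤ i by simp; omega), h]

-- ===== VERDICT (by name: the statement is the Claim_ definition above) =====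
theorem minimumPrefixLength_spec : Claim_equal_minimumPrefixLength := by
  intro nums _ hpre
  unfold Spec_minimumPrefixLength minimumPrefixLength minimumPrefixLength_alt
  have hn : 1 ≤ nums.length := by
    cases nums with
    | nil => exact absurd rfl hpre
    | cons x xs => simp
  have hble : pvBnd nums (nums.length - 1) ≤ nums.length - 1 := pvBnd_le nums (nums.length - 1)
  -- A's side: the final suffix array is true exactly on [pvBnd, n)
  have hchar : ∀ i, i < nums.length →
      (pvSufLoop nums (nums.length - 1)
        ((List.replicate nums.length false).set (nums.length - 1) true)).getD i false
        = decide (pvBnd nums (nums.length - 1) ≤ i) := by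
    intro i hi
    rw [sufLoop_char nums (nums.length - 1) _ (by simp) i]
    by_cases hib : pvBnd nums (nums.length - 1) ≤ i
    · rw [decide_eq_true hib]
      by_cases hiu : i < nums.length - 1
      · rw [if_pos ⟨hib, hiu⟩]
      · rw [if_neg (by omega), initSuf_getD nums.length hn i]
        have hieq : i = nums.length - 1 := by omega
        simp [hieq]
    · rw [decide_eq_false hib, if_neg (fun h => hib h.1), initSuf_getD nums.length hn i]
      have hine : i ≠ nums.length - 1 := by omega
      simp [hine]
  rw [findLoop_eq _ nums.length (pvBnd nums (nums.length - 1)) (by omega) hchar]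
  -- B's side
  rw [B_eq_bnd nums (nums.length - 1) 0]
  unfold pvBnd
  cases h : pvLastDesc nums (nums.length - 1) with
  | none => simp
  | some j => simp
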